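-- pv_equiv track=rewrite | github.com/cwstra/rpdiscordrewrite | cogs/specialized/dice/rollparser.py | generalSplit
-- ===== SOURCE A (Python) =====
-- def generalSplit(stringIn,markerDict={'-':-1,'+':1,None:1}):
--     output = []
--     sign = markerDict[stringIn[0]] if stringIn[0] in markerDict else markerDict[None]
--     if stringIn[0] in markerDict:
--         stringIn = stringIn[1:]
--     while len(stringIn) > 0:
--         ind = next((i for i, ch in enumerate(stringIn) if ch in markerDict),None)
--         if ind == None:
--             output.append((sign,stringIn))
--             break
--         else:
--             oneRoll = stringIn[:ind]
--             output.append((sign,oneRoll))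
--             stringIn = stringIn[ind:]
--             sign = markerDict[stringIn[0]] if stringIn[0] in markerDict else markerDict[None]
--             stringIn = stringIn[1:]
--     return output
-- ===== SOURCE B (Python) =====
-- def generalSplit(stringIn, markerDict={'-': -1, '+': 1, None: 1}):
--     # One linear pass with a character buffer instead of repeated find-and-slice.
--     first = stringIn[0]
--     if first in markerDict:
--         sign = markerDict[first]
--         start = 1
--     else:
--         sign = markerDict[None]
--         start = 0
--     output = []
--     buf = []
--     for ch in stringIn[start:]:
--         if ch in markerDict:
--             output.append((sign, ''.join(buf)))
--             buf = []
--             sign = markerDict[ch]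
--         else:
--             buf.append(ch)
--     if buf:
--         output.append((sign, ''.join(buf)))
--     return output
-- ===== Notes on version B (the rewrite author's own statement) =====
-- stated objective: alternative
-- what changed: Replaces A's while-loop of repeated next()/enumerate marker searches and string slicing with a single left-to-right character scan that accumulates the current segment in a buffer and flushes it at each marker (and at the end if nonempty).
import Mathlib
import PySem

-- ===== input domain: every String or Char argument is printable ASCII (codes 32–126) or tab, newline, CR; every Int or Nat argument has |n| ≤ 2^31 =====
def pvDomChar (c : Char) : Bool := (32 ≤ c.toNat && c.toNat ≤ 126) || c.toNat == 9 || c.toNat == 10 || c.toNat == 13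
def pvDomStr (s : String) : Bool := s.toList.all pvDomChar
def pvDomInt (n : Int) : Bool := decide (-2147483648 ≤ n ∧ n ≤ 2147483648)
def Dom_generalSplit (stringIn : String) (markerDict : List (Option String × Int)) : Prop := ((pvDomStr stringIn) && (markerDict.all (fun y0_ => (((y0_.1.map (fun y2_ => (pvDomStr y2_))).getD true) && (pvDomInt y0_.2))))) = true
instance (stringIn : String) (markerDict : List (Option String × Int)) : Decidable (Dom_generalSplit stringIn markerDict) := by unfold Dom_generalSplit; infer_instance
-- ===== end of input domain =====

-- B replaces A's repeated find-index-and-slice loop by a single left-to-right scan with a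
-- character buffer (objective: alternative decomposition, same O(n) cost).

-- ===== PORT A =====
-- key for a one-character string, as Python's `ch in markerDict` / `markerDict[ch]` sees it
def gsKey (c : Char) : Option String := some (String.ofList [c])
-- `x in markerDict`
def gsHas (d : PySem.Dict (Option String) Int) (k : Option String) : Bool := (PySem.Dict.get? d k).isSome
-- `markerDict[x] if x in markerDict else markerDict[None]`; `.getD 0` is only reached when the
-- key is absent, i.e. exactly where Python raises KeyError — those inputs are excluded by Pre_.
def gsSign (d : PySem.Dict (Option String) Int) (c : Char) : Int :=
  if gsHas d (gsKey c) then (PySem.Dict.get? d (gsKey c)).getD 0 else (PySem.Dict.get? d none).getD 0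

-- the `while len(stringIn) > 0` loop of A: find next marker, slice, recompute sign
def gsLoopA (d : PySem.Dict (Option String) Int) (s : List Char) (sign : Int) : List (Int × String) :=
  if s = [] then []
  else
    match s.findIdx? (fun ch => gsHas d (gsKey ch)) with
    | none => [(sign, String.ofList s)]
    | some i =>
      match hd : s.drop i with
      | [] => []  -- unreachable: findIdx? returns an index < s.length
      | c :: rest => (sign, String.ofList (s.take i)) :: gsLoopA d rest (gsSign d c)
termination_by s.length
decreasing_by
  have h1 : (s.drop i).length = s.length - i := List.length_drop
  rw [hd] at h1
  simp at h1
  omega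

def generalSplit (stringIn : String) (markerDict : List (Option String × Int)) : List (Int × String) :=
  let d := PySem.Dict.ofList markerDict
  match stringIn.toList with
  | [] => []  -- Python raises IndexError on stringIn[0]; excluded by Pre_
  | c :: rest =>
    let sign := gsSign d c
    if gsHas d (gsKey c) then gsLoopA d rest sign else gsLoopA d (c :: rest) sign

-- ===== PORT B =====
-- the single `for ch in stringIn[start:]` pass of B, carrying the buffer
def gsLoopB (d : PySem.Dict (Option String) Int) (s : List Char) (sign : Int) (buf : List Char) :
    List (Int × String) :=
  match s with
  | [] => if buf = [] then [] else [(sign, String.ofList buf)]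
  | c :: rest =>
    if gsHas d (gsKey c) then
      (sign, String.ofList buf) :: gsLoopB d rest ((PySem.Dict.get? d (gsKey c)).getD 0) []
    else
      gsLoopB d rest sign (buf ++ [c])

def generalSplit_alt (stringIn : String) (markerDict : List (Option String × Int)) : List (Int × String) :=
  let d := PySem.Dict.ofList markerDict
  match stringIn.toList with
  | [] => []  -- Python raises IndexError on stringIn[0]; excluded by Pre_
  | c :: rest =>
    if gsHas d (gsKey c) then
      gsLoopB d rest ((PySem.Dict.get? d (gsKey c)).getD 0) []
    else
      gsLoopB d (c :: rest) ((PySem.Dict.get? d none).getD 0) []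

-- ===== PRECONDITION & SPEC =====
-- Pre_ excludes exactly the inputs where Python A raises: the empty string (IndexError on
-- stringIn[0]) and a first character that is not a key while None is not a key (KeyError).
def Pre_generalSplit (stringIn : String) (markerDict : List (Option String × Int)) : Prop :=
  stringIn.toList ≠ [] ∧
  (gsHas (PySem.Dict.ofList markerDict) (gsKey (stringIn.toList.headD ' ')) = true ∨
   gsHas (PySem.Dict.ofList markerDict) none = true)
instance (stringIn : String) (markerDict : List (Option String × Int)) : Decidable (Pre_generalSplit stringIn markerDict) := by unfold Pre_generalSplit; infer_instance

def pvWitness_generalSplit : String × (List (Option String × Int)) :=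
  ("1d4+2d6", [(some "-", -1), (some "+", 1), (none, 1)])

def Spec_generalSplit (stringIn : String) (markerDict : List (Option String × Int)) (out : List (Int × String)) : Prop := out = generalSplit_alt stringIn markerDict
instance (stringIn : String) (markerDict : List (Option String × Int)) (out : List (Int × String)) : Decidable (Spec_generalSplit stringIn markerDict out) := by unfold Spec_generalSplit; infer_instance

-- ===== CLAIM (what is proved, stated in full; the proofs are below) =====
def Claim_equal_generalSplit : Prop := ∀ (stringIn : String) (markerDict : List (Option String × Int)), Dom_generalSplit stringIn markerDict → Pre_generalSplit stringIn markerDict → Spec_generalSplit stringIn markerDict (generalSplit stringIn markerDict)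

-- ===== LEMMAS AND PROOFS =====

-- prepend a pending buffer to the head segment of an already-produced tail
def gsAttach (sign : Int) (buf : List Char) : List (Int × String) → List (Int × String)
  | [] => if buf = [] then [] else [(sign, String.ofList buf)]
  | (sg, str) :: t => (sg, String.ofList (buf ++ str.toList)) :: t

theorem gsLoopB_buf (d : PySem.Dict (Option String) Int) (s : List Char) (sign : Int)
    (buf : List Char) : gsLoopB d s sign buf = gsAttach sign buf (gsLoopB d s sign []) := by
  induction s generalizing buf with
  | nil => simp [gsLoopB, gsAttach]
  | cons c rest ih =>
    by_cases h : gsHas d (gsKey c) = true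
    · simp [gsLoopB, h, gsAttach]
    · simp only [gsLoopB, if_neg h, List.nil_append]
      rw [ih (buf ++ [c]), ih [c]]
      cases hL : gsLoopB d rest sign [] with
      | nil => simp [gsAttach]
      | cons p t => cases p with
        | mk sg str => simp [gsAttach]

theorem gsLoopA_cons_marker (d : PySem.Dict (Option String) Int) (c : Char) (rest : List Char)
    (sign : Int) (h : gsHas d (gsKey c) = true) :
    gsLoopA d (c :: rest) sign = (sign, String.ofList []) :: gsLoopA d rest (gsSign d c) := by
  rw [gsLoopA]
  simp [List.findIdx?_cons, h]

theorem gsLoopA_cons_nonmarker (d : PySem.Dict (Option String) Int) (c : Char) (rest : List Char)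
    (sign : Int) (h : ¬ gsHas d (gsKey c) = true) :
    gsLoopA d (c :: rest) sign = gsAttach sign [c] (gsLoopA d rest sign) := by
  conv_lhs => rw [gsLoopA]
  simp only [List.findIdx?_cons, h, if_false, reduceCtorEq]
  cases hf : rest.findIdx? (fun ch => gsHas d (gsKey ch)) with
  | none =>
    simp only [Option.map_none]
    conv_rhs => rw [gsLoopA]
    cases rest with
    | nil => simp [gsAttach]
    | cons c' rest' =>
      simp only [reduceCtorEq, if_false]
      rw [hf]
      simp [gsAttach]
  | some j =>
    simp only [Option.map_some]
    have hj : j < rest.length := by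
      rw [List.findIdx?_eq_some_iff_getElem] at hf
      exact hf.1
    have hrne : rest ≠ [] := by
      intro hre; rw [hre] at hj; simp at hj
    conv_rhs => rw [gsLoopA]
    simp only [if_neg hrne, hf]
    cases hd : rest.drop j with
    | nil =>
      exfalso
      have hlen : (rest.drop j).length = rest.length - j := List.length_drop
      rw [hd] at hlen; simp at hlen; omega
    | cons c' rest' =>
      have hdrop : (c :: rest).drop (j + 1) = rest.drop j := by simp
      simp only [gsAttach, List.take_succ_cons, String.toList_ofList]
      split
      · next heq => rw [hdrop] at heq; rw [heq] at hd; cases hd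
      · next c1 r1 heq =>
          rw [hdrop] at heq; rw [heq] at hd
          injection hd with h1 h2
          rw [h1, h2]
          simp

theorem gsLoopA_eq_gsLoopB (d : PySem.Dict (Option String) Int) (s : List Char) (sign : Int) :
    gsLoopA d s sign = gsLoopB d s sign [] := by
  induction s generalizing sign with
  | nil => simp [gsLoopA, gsLoopB]
  | cons c rest ih =>
    by_cases h : gsHas d (gsKey c) = true
    · rw [gsLoopA_cons_marker d c rest sign h, gsLoopB]
      simp only [h]
      rw [ih]
      congr 1
      simp [gsSign, h]
    · rw [gsLoopA_cons_nonmarker d c rest sign h, gsLoopB]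
      simp only [h, Bool.false_eq_true, if_false, List.nil_append]
      rw [ih, gsLoopB_buf d rest sign [c]]

theorem generalSplit_spec_aux (stringIn : String) (markerDict : List (Option String × Int)) :
    Pre_generalSplit stringIn markerDict →
    generalSplit stringIn markerDict = generalSplit_alt stringIn markerDict := by
  intro hpre
  unfold generalSplit generalSplit_alt
  cases hs : stringIn.toList with
  | nil => exact absurd (hpre.1) (by simp [hs])
  | cons c rest =>
    simp only
    by_cases h : gsHas (PySem.Dict.ofList markerDict) (gsKey c) = true
    · rw [if_pos h, if_pos h, gsLoopA_eq_gsLoopB]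
      congr 1
      simp [gsSign, h]
    · rw [if_neg h, if_neg h, gsLoopA_eq_gsLoopB]
      congr 1
      simp [gsSign, h]

-- ===== VERDICT (by name: the statement is the Claim_ definition above) =====
theorem generalSplit_spec : Claim_equal_generalSplit := by
  intro stringIn markerDict _ hpre
  unfold Spec_generalSplit
  exact generalSplit_spec_aux stringIn markerDict hpre
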